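-- pv_equiv track=rewrite | github.com/NamazovMN/BIO-classifier | reader.py | counter_lengths
-- ===== SOURCE A (Python) =====
-- def counter_lengths(sentences, collection_type='essay') -> list:
--     '''
--     The function is used in order to collect information about number of sentences per essay or paragraph
--     :param sentences: list of sentences, where each sentence is list of tuples
--     :param collection_type: string object defines whether we need information per essay or paragraph
--     :return: list of (number of sentences) per essay or paragraph
--     '''
--     delimiter = ('__END_ESSAY__', 'O') if collection_type == 'essay' else ('__END_PARAGRAPH__', 'O')
--     collect_count = list()
--     sent_count = 0
--     for each_sentence in sentences:
--         sent_count += 1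
--         if delimiter in each_sentence:
--             collect_count.append(sent_count)
--             sent_count = 0
--     return collect_count
-- ===== SOURCE B (Python) =====
-- def counter_lengths(sentences, collection_type='essay') -> list:
--     delimiter = ('__END_ESSAY__', 'O') if collection_type == 'essay' else ('__END_PARAGRAPH__', 'O')
--     bounds = [i for i, sentence in enumerate(sentences) if delimiter in sentence]
--     if not bounds:
--         return []
--     return [bounds[0] + 1] + [b - a for a, b in zip(bounds, bounds[1:])]
-- ===== Notes on version B (the rewrite author's own statement) =====
-- stated objective: alternative
-- what changed: Replaces A's running sentence counter that resets at each delimiter with a two-phase form: first collect the boundary indices (enumerate + membership filter), then produce the lengths as bounds[0]+1 followed by consecutive differences.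
import Mathlib
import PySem

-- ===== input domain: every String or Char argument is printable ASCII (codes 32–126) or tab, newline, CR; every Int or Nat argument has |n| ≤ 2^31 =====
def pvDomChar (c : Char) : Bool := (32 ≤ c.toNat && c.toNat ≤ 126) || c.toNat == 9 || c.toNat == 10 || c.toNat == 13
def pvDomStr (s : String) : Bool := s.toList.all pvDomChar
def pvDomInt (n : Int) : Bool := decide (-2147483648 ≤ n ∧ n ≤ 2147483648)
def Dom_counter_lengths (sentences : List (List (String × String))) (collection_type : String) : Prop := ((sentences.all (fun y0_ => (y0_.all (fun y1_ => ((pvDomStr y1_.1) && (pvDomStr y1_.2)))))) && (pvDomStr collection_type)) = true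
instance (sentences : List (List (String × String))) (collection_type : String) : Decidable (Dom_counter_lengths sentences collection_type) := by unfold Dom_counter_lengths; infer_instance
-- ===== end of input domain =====

-- B replaces A's running counter with a boundary-index list plus consecutive differencing (alternative decomposition, same cost).

-- ===== PORT A =====
def counter_lengths (sentences : List (List (String × String))) (collection_type : String) : List Int :=
  let delimiter : String × String :=
    if collection_type == "essay" then ("__END_ESSAY__", "O") else ("__END_PARAGRAPH__", "O")
  let st := sentences.foldl
    (fun (st : List Int × Int) each_sentence =>
      let sent_count := st.2 + 1
      if delimiter ∈ each_sentence then (st.1 ++ [sent_count], 0) else (st.1, sent_count))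
    ([], 0)
  st.1

-- ===== PORT B =====
def counter_lengths_alt (sentences : List (List (String × String))) (collection_type : String) : List Int :=
  let delimiter : String × String :=
    if collection_type == "essay" then ("__END_ESSAY__", "O") else ("__END_PARAGRAPH__", "O")
  let bounds : List Int :=
    ((PySem.List.enumerate sentences 0).filter (fun p => decide (delimiter ∈ p.2))).map (·.1)
  match bounds with
  | [] => []
  | b0 :: _ => (b0 + 1) :: (bounds.zip (bounds.drop 1)).map (fun p => p.2 - p.1)

-- ===== PRECONDITION & SPEC =====
def Spec_counter_lengths (sentences : List (List (String × String))) (collection_type : String) (out : List Int) : Prop := out = counter_lengths_alt sentences collection_type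
instance (sentences : List (List (String × String))) (collection_type : String) (out : List Int) : Decidable (Spec_counter_lengths sentences collection_type out) := by unfold Spec_counter_lengths; infer_instance

-- ===== CLAIM (what is proved, stated in full; the proofs are below) =====
def Claim_equal_counter_lengths : Prop := ∀ (sentences : List (List (String × String))) (collection_type : String), Dom_counter_lengths sentences collection_type → Spec_counter_lengths sentences collection_type (counter_lengths sentences collection_type)

-- ===== LEMMAS AND PROOFS =====

-- common reference value: segment lengths, head-recursive
def pvSeg (d : String × String) : List (List (String × String)) → List Int
  | [] => []
  | s :: r =>
    if d ∈ s then 1 :: pvSeg d r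
    else
      match pvSeg d r with
      | [] => []
      | x :: xs => (x + 1) :: xs

def pvAddFirst (c : Int) : List Int → List Int
  | [] => []
  | x :: xs => (x + c) :: xs

theorem pvAddFirst_zero (l : List Int) : pvAddFirst 0 l = l := by
  cases l <;> simp [pvAddFirst]

-- A's loop, characterised
theorem pvA_loop (d : String × String) (sentences : List (List (String × String)))
    (acc : List Int) (cnt : Int) :
    (sentences.foldl
      (fun (st : List Int × Int) each_sentence =>
        let sent_count := st.2 + 1
        if d ∈ each_sentence then (st.1 ++ [sent_count], 0) else (st.1, sent_count))
      (acc, cnt)).1 = acc ++ pvAddFirst cnt (pvSeg d sentences) := by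
  induction sentences generalizing acc cnt with
  | nil => simp [pvSeg, pvAddFirst]
  | cons s r ih =>
    by_cases h : d ∈ s
    · simp only [List.foldl_cons, h, if_pos, ih, pvAddFirst_zero, pvSeg, pvAddFirst]
      simp
      cases pvSeg d r <;> simp [pvAddFirst] <;> omega
    · simp only [List.foldl_cons, h, if_neg, not_false_iff, pvSeg, ih]
      cases hr : pvSeg d r <;> simp [pvAddFirst] <;> omega

-- B's boundary list, characterised
def pvBnds (d : String × String) : List (List (String × String)) → Int → List Int
  | [], _ => []
  | s :: r, k => if d ∈ s then k :: pvBnds d r (k + 1) else pvBnds d r (k + 1)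

theorem pvB_bounds (d : String × String) (sentences : List (List (String × String))) (k : Int) :
    ((PySem.List.enumerate sentences k).filter (fun p => decide (d ∈ p.2))).map (·.1)
      = pvBnds d sentences k := by
  induction sentences generalizing k with
  | nil => simp [PySem.List.enumerate_nil, pvBnds]
  | cons s r ih =>
    by_cases h : d ∈ s <;>
      simp [PySem.List.enumerate_cons, h, pvBnds, ih]

def pvDiffs (bs : List Int) : List Int := (bs.zip (bs.drop 1)).map (fun p => p.2 - p.1)

theorem pvDiffs_cons (k : Int) (bs : List Int) :
    pvDiffs (k :: bs) = match bs with
      | [] => []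
      | b :: _ => (b - k) :: pvDiffs bs := by
  cases bs <;> simp [pvDiffs]

def pvFromBnds (k : Int) : List Int → List Int
  | [] => []
  | b0 :: bs => (b0 + 1 - k) :: pvDiffs (b0 :: bs)

-- differencing the boundary list gives the segment lengths
theorem pvB_main (d : String × String) (sentences : List (List (String × String))) (k : Int) :
    pvFromBnds k (pvBnds d sentences k) = pvSeg d sentences := by
  induction sentences generalizing k with
  | nil => simp [pvBnds, pvSeg, pvFromBnds]
  | cons s r ih =>
    by_cases h : d ∈ s
    · simp only [pvBnds, h, if_pos, pvSeg, ← ih (k + 1)]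
      cases hr : pvBnds d r (k + 1) with
      | nil => simp [pvFromBnds, pvDiffs]
      | cons b0 bs =>
        simp only [pvFromBnds, pvDiffs_cons, List.cons.injEq]
        and_intros <;> first | omega | rfl | trivial
    · simp only [pvBnds, h, if_neg, not_false_iff, pvSeg, ← ih (k + 1)]
      cases hr : pvBnds d r (k + 1) with
      | nil => simp [pvFromBnds]
      | cons b0 bs =>
        simp only [pvFromBnds, List.cons.injEq]
        and_intros <;> first | omega | rfl | trivial

-- ===== VERDICT (by name: the statement is the Claim_ definition above) =====
theorem counter_lengths_spec : Claim_equal_counter_lengths := by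
  intro sentences collection_type _
  unfold Spec_counter_lengths counter_lengths counter_lengths_alt
  set d : String × String :=
    if collection_type == "essay" then ("__END_ESSAY__", "O") else ("__END_PARAGRAPH__", "O") with hd
  simp only [pvA_loop, List.nil_append, pvAddFirst_zero, pvB_bounds]
  rw [← pvB_main d sentences 0]
  cases hr : pvBnds d sentences 0 with
  | nil => simp [pvFromBnds]
  | cons b0 bs =>
    simp only [pvFromBnds, List.cons.injEq]
    and_intros <;> first | omega | rfl | trivial
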